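-- pv_equiv track=rewrite | github.com/KIDSSCC/Co-location | OLPart/OLPart/Additional/run.py | refer_core
-- ===== SOURCE A (Python) =====
-- from typing import List, Dict, Tuple
--
-- def refer_core(core_config:List[int], unit_scale:int = 1) -> List[str]:    # len(core_config) = NUM_APPS
--     """
--     translate core config to core command, [2,4,3] => ["0,1","2,3,4,5","6,7,8"]
--     input: core config list
--     output: core command list
--     """
--
--     core_config = [c * unit_scale for c in core_config]
--     core_allocation_list = [""] * len(core_config)
--     endpoint_left = 0
--     for i in range(len(core_config)):
--         endpoint_right = endpoint_left + core_config[i] - 1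
--         core_list = list(range(endpoint_left, endpoint_right+1))
--         for j in range(len(core_list)):
--             if core_list[j] > 27:
--                 core_list[j] += 28
--         core_allocation_list[i] = ",".join([str(c) for c in core_list])
--         endpoint_left = endpoint_right + 1
--     return core_allocation_list
-- ===== SOURCE B (Python) =====
-- from typing import List
--
-- def refer_core(core_config: List[int], unit_scale: int = 1) -> List[str]:
--     # Back-to-front: compute the grand total first, then walk the config in
--     # REVERSE, recovering each window's left boundary by subtracting its scaled
--     # count from the running right boundary, and reverse the collected groups.
--     out = []
--     hi = sum(c * unit_scale for c in core_config)
--     for c in reversed(core_config):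
--         lo = hi - c * unit_scale
--         out.append(",".join(str(i + 28 if i > 27 else i) for i in range(lo, hi)))
--         hi = lo
--     out.reverse()
--     return out
-- ===== Notes on version B (the rewrite author's own statement) =====
-- stated objective: alternative
-- what changed: A walks forward with a mutating left endpoint and assigns into a preallocated list; B first sums the grand total, then consumes the config in REVERSE, recovering each window's left boundary by subtraction and reversing the collected groups at the end, with the >27 remap applied per element in the render expression instead of patching a materialised list.
import Mathlib
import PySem

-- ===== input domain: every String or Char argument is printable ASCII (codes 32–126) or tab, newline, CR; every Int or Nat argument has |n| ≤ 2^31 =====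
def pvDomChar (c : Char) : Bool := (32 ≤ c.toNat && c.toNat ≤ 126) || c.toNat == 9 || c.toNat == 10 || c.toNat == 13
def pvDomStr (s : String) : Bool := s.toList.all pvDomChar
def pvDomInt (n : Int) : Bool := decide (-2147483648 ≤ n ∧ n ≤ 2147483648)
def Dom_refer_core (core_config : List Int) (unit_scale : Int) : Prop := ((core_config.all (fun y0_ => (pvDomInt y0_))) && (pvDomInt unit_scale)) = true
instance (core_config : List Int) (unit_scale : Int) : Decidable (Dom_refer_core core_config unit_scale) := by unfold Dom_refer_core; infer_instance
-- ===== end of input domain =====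

-- B builds the allocation back-to-front: it sums the grand total first, consumes the
-- config in reverse recovering each left boundary by subtraction, then reverses
-- (objective: alternative traversal order, same cost).

-- ===== PORT A =====
def refer_core (core_config : List Int) (unit_scale : Int) : List String :=
  let scaled := core_config.map (fun c => c * unit_scale)
  let st := (PySem.List.pyRange 0 (scaled.length : Int) 1).foldl
    (fun (st : List String × Int) i =>
      let endpoint_right := st.2 + PySem.List.pyGetD scaled i 0 - 1
      let core_list := PySem.List.pyRange st.2 (endpoint_right + 1) 1
      let core_list := core_list.map (fun x => if x > 27 then x + 28 else x)
      (PySem.List.pySetD st.1 i (PySem.Str.join "," (core_list.map PySem.Int.toStr)),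
       endpoint_right + 1))
    (List.replicate scaled.length "", 0)
  st.1

-- ===== PORT B =====
-- render of one window [lo, hi): per-element remap inside the join
def pvRender (lo hi : Int) : String :=
  PySem.Str.join "," ((PySem.List.pyRange lo hi 1).map
    (fun i => PySem.Int.toStr (if i > 27 then i + 28 else i)))

def refer_core_alt (core_config : List Int) (unit_scale : Int) : List String :=
  let st := core_config.reverse.foldl
    (fun (s : Int × List String) c =>
      let lo := s.1 - c * unit_scale
      (lo, s.2 ++ [pvRender lo s.1]))
    ((core_config.map (fun c => c * unit_scale)).sum, [])
  st.2.reverse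

-- ===== PRECONDITION & SPEC =====
def Spec_refer_core (core_config : List Int) (unit_scale : Int) (out : List String) : Prop := out = refer_core_alt core_config unit_scale
instance (core_config : List Int) (unit_scale : Int) (out : List String) : Decidable (Spec_refer_core core_config unit_scale out) := by unfold Spec_refer_core; infer_instance

-- ===== CLAIM (what is proved, stated in full; the proofs are below) =====
def Claim_equal_refer_core : Prop := ∀ (core_config : List Int) (unit_scale : Int), Dom_refer_core core_config unit_scale → Spec_refer_core core_config unit_scale (refer_core core_config unit_scale)

-- ===== LEMMAS AND PROOFS =====

-- the common reference result on a scaled count list starting at a given left endpoint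
def buildGroups (left : Int) : List Int → List String
  | [] => []
  | c :: r => pvRender left (left + c) :: buildGroups (left + c) r

-- A's body, abstracted over the full scaled list it indexes into
def stepA (full : List Int) (st : List String × Int) (i : Int) : List String × Int :=
  let endpoint_right := st.2 + PySem.List.pyGetD full i 0 - 1
  let core_list := PySem.List.pyRange st.2 (endpoint_right + 1) 1
  let core_list := core_list.map (fun x => if x > 27 then x + 28 else x)
  (PySem.List.pySetD st.1 i (PySem.Str.join "," (core_list.map PySem.Int.toStr)),
   endpoint_right + 1)

-- A's per-window string (map-then-map-toStr) equals B's fused render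
lemma grpA_eq_render (lo hi : Int) :
    PySem.Str.join ","
      (((PySem.List.pyRange lo hi 1).map (fun x => if x > 27 then x + 28 else x)).map
        PySem.Int.toStr) = pvRender lo hi := by
  unfold pvRender
  rw [List.map_map]
  rfl

lemma loopA (full : List Int) :
    ∀ (s t : List Int) (pre : List String) (left : Int),
      full = t ++ s → pre.length = t.length →
      ((PySem.List.pyRange (t.length : Int) (full.length : Int) 1).foldl (stepA full)
        (pre ++ List.replicate s.length "", left)).1 = pre ++ buildGroups left s := by
  intro s
  induction s with
  | nil =>
    intro t pre left hfull hlen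
    subst hfull
    rw [PySem.List.pyRange_one_eq_nil (by simp)]
    simp [buildGroups]
  | cons c r ih =>
    intro t pre left hfull hlen
    subst hfull
    have hlt : (t.length : Int) < ((t ++ c :: r).length : Int) := by
      simp
    rw [PySem.List.pyRange_one_cons hlt]
    simp only [List.foldl_cons]
    have hget : PySem.List.pyGetD (t ++ c :: r) (t.length : Int) 0 = c := by
      rw [PySem.List.pyGetD_natCast]
      simp [List.getD]
    have hset : PySem.List.pySetD (pre ++ List.replicate (c :: r).length "")
        (t.length : Int)
        (PySem.Str.join ","
          (((PySem.List.pyRange left (left + c - 1 + 1) 1).map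
            (fun x => if x > 27 then x + 28 else x)).map PySem.Int.toStr))
        = (pre ++ [pvRender left (left + c)]) ++ List.replicate r.length "" := by
      rw [PySem.List.pySetD_natCast]
      have : left + c - 1 + 1 = left + c := by omega
      rw [this, grpA_eq_render]
      rw [← hlen, List.set_append_right _ _ (Nat.le_refl pre.length)]
      simp [List.replicate_succ, List.append_assoc]
    simp only [stepA, hget, hset]
    have harr : left + c - 1 + 1 = left + c := by omega
    rw [harr]
    have := ih (t ++ [c]) (pre ++ [pvRender left (left + c)]) (left + c)
      (by simp) (by simp [hlen])
    have hcast : ((t ++ [c]).length : Int) = (t.length : Int) + 1 := by simp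
    rw [hcast] at this
    rw [List.append_assoc] at this ⊢
    simpa [buildGroups] using this

-- B's step as a named function
def stepB (u : Int) (s : Int × List String) (c : Int) : Int × List String :=
  (s.1 - c * u, s.2 ++ [pvRender (s.1 - c * u) s.1])

-- B's reverse fold, seen as a foldr, produces the reversed reference groups
lemma loopB (u : Int) :
    ∀ (cs : List Int) (left : Int) (acc : List String),
      cs.foldr (fun c s => stepB u s c)
        (left + (cs.map (fun c => c * u)).sum, acc)
        = (left, acc ++ (buildGroups left (cs.map (fun c => c * u))).reverse) := by
  intro cs
  induction cs with
  | nil => intro left acc; simp [buildGroups]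
  | cons c r ih =>
    intro left acc
    simp only [List.foldr_cons, List.map_cons, List.sum_cons]
    have harr : left + (c * u + (r.map (fun c => c * u)).sum)
        = (left + c * u) + (r.map (fun c => c * u)).sum := by ring
    rw [harr, ih (left + c * u) acc]
    simp only [stepB, buildGroups, List.reverse_cons, Prod.mk.injEq]
    constructor
    · ring
    · have : left + c * u - c * u = left := by ring
      rw [this, List.append_assoc]

-- ===== VERDICT (by name: the statement is the Claim_ definition above) =====
theorem refer_core_spec : Claim_equal_refer_core := by
  intro core_config unit_scale _
  unfold Spec_refer_core refer_core refer_core_alt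
  simp only
  have hA := loopA (core_config.map (fun c => c * unit_scale))
    (core_config.map (fun c => c * unit_scale)) [] [] 0 (by simp) rfl
  simp only [List.length_nil, Nat.cast_zero, List.nil_append] at hA
  refine hA.trans ?_
  have hB := loopB unit_scale core_config 0 []
  simp only [zero_add, List.nil_append] at hB
  rw [List.foldl_reverse]
  have : (fun (s : Int × List String) (c : Int) =>
      (s.1 - c * unit_scale, s.2 ++ [pvRender (s.1 - c * unit_scale) s.1]))
      = stepB unit_scale := rfl
  rw [show (fun (c : Int) (s : Int × List String) =>
      (s.1 - c * unit_scale, s.2 ++ [pvRender (s.1 - c * unit_scale) s.1]))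
      = (fun c s => stepB unit_scale s c) from rfl]
  rw [hB]
  simp
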